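-- pv_equiv track=rewrite | github.com/SkiveF/testech | katas/sudoku.py | is_valid_unit
-- ===== SOURCE A (Python) =====
-- def is_valid_unit(unit):
--     seen = set()
--     for num in unit:
--         if num != ".":
--             if num in seen:
--                 return False
--             seen.add(num)
--     return True
-- ===== SOURCE B (Python) =====
-- def is_valid_unit(unit):
--     nums = sorted(n for n in unit if n != ".")
--     return all(a != b for a, b in zip(nums, nums[1:]))
-- ===== Notes on version B (the rewrite author's own statement) =====
-- stated objective: alternative
-- what changed: Replaces the incremental seen-set scan with early return by sort-then-adjacent-compare: sort the non-dot entries and check that no two adjacent entries are equal (no set, no membership tests).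
import Mathlib
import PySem

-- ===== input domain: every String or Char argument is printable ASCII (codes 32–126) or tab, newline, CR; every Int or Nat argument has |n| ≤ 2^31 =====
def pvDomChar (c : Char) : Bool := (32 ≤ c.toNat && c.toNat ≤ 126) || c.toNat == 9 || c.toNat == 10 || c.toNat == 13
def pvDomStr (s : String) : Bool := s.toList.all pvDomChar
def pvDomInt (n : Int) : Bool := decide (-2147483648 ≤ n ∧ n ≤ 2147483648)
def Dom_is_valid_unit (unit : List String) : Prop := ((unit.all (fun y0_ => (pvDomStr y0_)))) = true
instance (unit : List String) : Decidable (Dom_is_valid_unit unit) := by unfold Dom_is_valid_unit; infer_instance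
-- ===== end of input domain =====

-- B replaces A's incremental seen-set scan (membership test + early return) by a
-- sort-then-adjacent-compare algorithm: sort the non-dot entries and check that no
-- two adjacent entries of the sorted list are equal (objective: alternative).


-- ===== PORT A =====
-- the 'for num in unit' loop with its running set 'seen' and early 'return False'
def is_valid_unit_go (seen : PySem.Set String) : List String → Bool
  | [] => true
  | num :: rest =>
      if num ≠ "." then
        if PySem.Set.contains seen num then false
        else is_valid_unit_go (PySem.Set.add seen num) rest
      else is_valid_unit_go seen rest

def is_valid_unit (unit : List String) : Bool :=
  is_valid_unit_go PySem.Set.empty unit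

-- ===== PORT B =====
-- nums = sorted(n for n in unit if n != "."); all(a != b for a, b in zip(nums, nums[1:]))
def is_valid_unit_alt (unit : List String) : Bool :=
  let nums := PySem.List.sorted (unit.filter (fun n => n != ".")) (fun x => x) false
  (nums.zip (nums.drop 1)).all (fun p => p.1 != p.2)

-- ===== PRECONDITION & SPEC =====
def Spec_is_valid_unit (unit : List String) (out : Bool) : Prop := out = is_valid_unit_alt unit
instance (unit : List String) (out : Bool) : Decidable (Spec_is_valid_unit unit out) := by unfold Spec_is_valid_unit; infer_instance

-- ===== CLAIM (what is proved, stated in full; the proofs are below) =====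
def Claim_equal_is_valid_unit : Prop := ∀ (unit : List String), Dom_is_valid_unit unit → Spec_is_valid_unit unit (is_valid_unit unit)

-- ===== LEMMAS AND PROOFS =====

-- A's loop returns true iff the non-dot entries are pairwise distinct and none is already in 'seen'
theorem go_true_iff (l : List String) : ∀ (seen : List String),
    is_valid_unit_go seen l = true ↔
      ((l.filter (fun n => n != ".")).Nodup ∧ ∀ x ∈ l.filter (fun n => n != "."), x ∉ seen) := by
  induction l with
  | nil => intro seen; simp [is_valid_unit_go]
  | cons num rest ih =>
    intro seen
    by_cases hdot : num = "."
    · simp [is_valid_unit_go, hdot, ih]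
    · by_cases hmem : num ∈ seen
      · have hc : PySem.Set.contains seen num = true := (PySem.Set.contains_iff seen num).mpr hmem
        simp only [is_valid_unit_go, List.filter_cons]
        simp [hdot, hmem]
      · have hc : PySem.Set.contains seen num = false := by
          rw [Bool.eq_false_iff]
          intro h
          exact hmem ((PySem.Set.contains_iff seen num).mp h)
        simp only [is_valid_unit_go, List.filter_cons]
        simp only [hdot, hc, Bool.false_eq_true, if_false, bne_iff_ne, ne_eq,
          not_false_eq_true, if_pos]
        rw [ih, PySem.Set.add_of_not_mem hmem]
        simp only [List.nodup_cons, List.mem_cons, List.mem_append, List.mem_filter]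
        constructor
        · rintro ⟨hnd, hall⟩
          refine ⟨⟨fun hp => (hall num hp) (Or.inr (Or.inl rfl)), hnd⟩, ?_⟩
          rintro x (rfl | hx)
          · exact hmem
          · exact fun hs => hall x hx (Or.inl hs)
        · rintro ⟨⟨hni, hnd⟩, hall⟩
          refine ⟨hnd, fun x hx => ?_⟩
          rintro (hs | rfl | h0)
          · exact hall x (Or.inr hx) hs
          · exact hni hx
          · exact (List.not_mem_nil h0)

-- the adjacent-pair test of B is the chain of (· ≠ ·)
theorem adj_all_iff_chain' : ∀ (l : List String),
    ((l.zip (l.drop 1)).all (fun p => p.1 != p.2) = true) ↔ l.IsChain (fun a b => a ≠ b) := by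
  intro l
  induction l with
  | nil => simp
  | cons a t ih =>
    cases t with
    | nil => simp
    | cons b t' =>
      simp only [List.drop_succ_cons, List.drop_zero, List.zip_cons_cons, List.all_cons,
        Bool.and_eq_true, bne_iff_ne, ne_eq, List.isChain_cons_cons] at *
      rw [ih]

-- on a list sorted in non-decreasing order, adjacent-distinct is exactly Nodup
theorem chain'_ne_iff_nodup : ∀ (l : List String), l.Pairwise (· ≤ ·) →
    (l.IsChain (fun a b => a ≠ b) ↔ l.Nodup) := by
  intro l
  induction l with
  | nil => simp
  | cons a t ih =>
    intro hp
    rw [List.pairwise_cons] at hp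
    obtain ⟨hle, hpt⟩ := hp
    cases t with
    | nil => simp
    | cons b t' =>
      rw [List.isChain_cons_cons, ih hpt]
      simp only [List.nodup_cons]
      constructor
      · rintro ⟨hab, hnd⟩
        refine ⟨?_, hnd⟩
        intro hat
        rcases List.mem_cons.mp hat with rfl | hat'
        · exact hab rfl
        · have hba : b ≤ a := (List.pairwise_cons.mp hpt).1 a hat'
          exact hab (le_antisymm (hle b (by simp)) hba)
      · rintro ⟨hni, hnd⟩
        exact ⟨fun hab => hni (hab ▸ List.mem_cons_self), hnd⟩

theorem alt_true_iff (unit : List String) :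
    is_valid_unit_alt unit = true ↔ (unit.filter (fun n => n != ".")).Nodup := by
  unfold is_valid_unit_alt
  set nums := PySem.List.sorted (unit.filter (fun n => n != ".")) (fun x => x) false with hn
  have hperm : nums.Perm (unit.filter (fun n => n != ".")) := PySem.List.sorted_perm _ _ _
  have hpw : nums.Pairwise (· ≤ ·) := by
    have := PySem.List.sorted_pairwise (xs := unit.filter (fun n => n != ".")) (key := fun x => x)
    simpa [hn] using this
  rw [adj_all_iff_chain', chain'_ne_iff_nodup _ hpw]
  exact hperm.nodup_iff

-- ===== VERDICT (by name: the statement is the Claim_ definition above) =====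
theorem is_valid_unit_spec : Claim_equal_is_valid_unit := by
  intro unit _
  unfold Spec_is_valid_unit
  have hA : is_valid_unit unit = true ↔ (unit.filter (fun n => n != ".")).Nodup := by
    rw [is_valid_unit, go_true_iff]
    simp [PySem.Set.empty]
  exact Bool.eq_iff_iff.mpr (hA.trans (alt_true_iff unit).symm)
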